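-- pv_equiv track=rewrite | github.com/nikhilmalhotra123/CS131 | project/server.py | splitlocation
-- ===== SOURCE A (Python) =====
-- def splitlocation(location):
--     count = 0
--     for i in range(0, len(location)):
--         if location[i] == '+' or location[i]=='-':
--             count += 1
--             if count == 2:
--                 lat = location[:i]
--                 long = location[i:]
--     return [lat, long]
-- ===== SOURCE B (Python) =====
-- def splitlocation(location):
--     def next_sign(s, start):
--         p = s.find('+', start)
--         m = s.find('-', start)
--         if p == -1:
--             return m
--         if m == -1:
--             return p
--         return min(p, m)
--     first = next_sign(location, 0)
--     i = next_sign(location, first + 1)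
--     lat = location[:i]
--     long = location[i:]
--     return [lat, long]
-- ===== Notes on version B (the rewrite author's own statement) =====
-- stated objective: alternative
-- what changed: B has no index loop or counter: it computes the second sign position with two staged calls to a next_sign helper built from the library str.find (for '+' and for '-', combined by min), then slices once.
import Mathlib
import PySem

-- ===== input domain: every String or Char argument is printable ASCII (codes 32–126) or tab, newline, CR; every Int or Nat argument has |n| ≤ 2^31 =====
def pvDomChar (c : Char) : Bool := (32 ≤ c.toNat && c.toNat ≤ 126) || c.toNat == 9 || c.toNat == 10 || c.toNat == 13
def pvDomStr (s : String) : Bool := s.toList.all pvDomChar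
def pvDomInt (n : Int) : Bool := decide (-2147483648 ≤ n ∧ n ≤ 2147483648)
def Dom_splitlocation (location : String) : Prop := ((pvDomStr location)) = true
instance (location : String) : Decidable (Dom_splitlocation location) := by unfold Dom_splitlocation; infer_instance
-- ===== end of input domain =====

-- B replaces A's manual index loop with two library-find passes (str.find for '+' and '-',
-- combined, called twice) and a single slice (objective: alternative).

def isSign (c : Char) : Bool := c == '+' || c == '-'

-- ===== PORT A =====
-- A's loop state: (count, lat/long if assigned); location[i] with 0 ≤ i < len is exactly getD,
-- location[:i]/location[i:] are PySem slices.
def splitlocationStep (location : String) (st : Nat × Option (String × String)) (i : Nat) :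
    Nat × Option (String × String) :=
  if isSign (location.toList.getD i ' ') then
    let count := st.1 + 1
    if count == 2 then
      (count, some (PySem.Str.slice location none (some (i : Int)),
                    PySem.Str.slice location (some (i : Int)) none))
    else (count, st.2)
  else st

def splitlocation (location : String) : List String :=
  let st := (List.range location.toList.length).foldl (splitlocationStep location) (0, none)
  match st.2 with
  | some (lat, lng) => [lat, lng]
  | none => []  -- Python raises UnboundLocalError here; excluded by Pre_

-- ===== PORT B =====
-- next_sign(s, start): the smaller of s.find('+', start) and s.find('-', start), -1 rules as in Source B
def nextSign (s : String) (start : Int) : Int :=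
  let p := PySem.Str.findFrom s "+" start
  let m := PySem.Str.findFrom s "-" start
  if p == -1 then m else if m == -1 then p else min p m

def splitlocation_alt (location : String) : List String :=
  let first := nextSign location 0
  let i := nextSign location (first + 1)
  [PySem.Str.slice location none (some i), PySem.Str.slice location (some i) none]

-- ===== PRECONDITION & SPEC =====
-- Pre_ excludes exactly the inputs on which A raises UnboundLocalError
-- (fewer than two '+'/'-' characters in the string).
def Pre_splitlocation (location : String) : Prop :=
  2 ≤ (location.toList.filter isSign).length
instance (location : String) : Decidable (Pre_splitlocation location) := by
  unfold Pre_splitlocation; infer_instance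

def pvWitness_splitlocation : String := "+12-34"

def Spec_splitlocation (location : String) (out : List String) : Prop := out = splitlocation_alt location
instance (location : String) (out : List String) : Decidable (Spec_splitlocation location out) := by unfold Spec_splitlocation; infer_instance

-- ===== CLAIM (what is proved, stated in full; the proofs are below) =====
def Claim_equal_splitlocation : Prop := ∀ (location : String), Dom_splitlocation location → Pre_splitlocation location → Spec_splitlocation location (splitlocation location)

-- ===== LEMMAS AND PROOFS =====

-- sign positions strictly below n (A's loop order)
def signPos (cs : List Char) (n : Nat) : List Nat :=
  (List.range n).filter (fun i => isSign (cs.getD i ' '))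

-- sign positions by structural recursion with an offset (B's view)
def signPosL : List Char → Nat → List Nat
  | [], _ => []
  | c :: t, i => if isSign c then i :: signPosL t (i + 1) else signPosL t (i + 1)

theorem signPos_succ (cs : List Char) (n : Nat) :
    signPos cs (n + 1) =
      if isSign (cs.getD n ' ') then signPos cs n ++ [n] else signPos cs n := by
  simp only [signPos, List.range_succ, List.filter_append, List.filter_cons, List.filter_nil]
  split <;> simp_all

-- invariant of A's fold
theorem foldA_inv (location : String) (n : Nat) :
    (List.range n).foldl (splitlocationStep location) (0, none) =
      ((signPos location.toList n).length,
       ((signPos location.toList n)[1]?).map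
         (fun (i : Nat) => (PySem.Str.slice location none (some (i : Int)),
                    PySem.Str.slice location (some (i : Int)) none))) := by
  induction n with
  | zero => simp [signPos]
  | succ n ih =>
    rw [List.range_succ, List.foldl_append, ih, signPos_succ]
    simp only [List.foldl_cons, List.foldl_nil, splitlocationStep]
    by_cases h : isSign (location.toList.getD n ' ') = true
    · rw [if_pos h, if_pos h]
      rcases hsp : signPos location.toList n with _ | ⟨a, _ | ⟨b, rest⟩⟩ <;> simp_all
    · rw [if_neg h, if_neg h]

theorem signPosL_eq (cs : List Char) (i : Nat) :
    signPosL cs i = (signPos cs cs.length).map (fun j => i + j) := by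
  induction cs generalizing i with
  | nil => simp [signPosL, signPos]
  | cons c t ih =>
    have hrange : signPos (c :: t) (t.length + 1) =
        (if isSign c then [0] else []) ++ (signPos t t.length).map Nat.succ := by
      simp only [signPos, List.range_succ_eq_map, List.filter_cons, List.filter_map]
      have hfun : ((fun i => isSign ((c :: t).getD i ' ')) ∘ Nat.succ)
          = (fun i => isSign (t.getD i ' ')) := funext fun j => by simp
      by_cases h : isSign c = true <;> simp_all [hfun]
    show signPosL (c :: t) i = (signPos (c :: t) (t.length + 1)).map (fun j => i + j)
    rw [hrange]
    by_cases h : isSign c = true <;>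
      simp [signPosL, h, ih, List.map_map, Function.comp_def, Nat.add_comm, Nat.add_assoc,
        Nat.add_left_comm]

theorem signPosL_length (cs : List Char) (i : Nat) :
    (signPosL cs i).length = (cs.filter isSign).length := by
  induction cs generalizing i with
  | nil => simp [signPosL]
  | cons c t ih =>
    by_cases h : isSign c = true <;> simp [signPosL, List.filter_cons, h, ih]

theorem signPosL_head (cs : List Char) (i : Nat) :
    (signPosL cs i).head? = (cs.findIdx? isSign).map (fun j => i + j) := by
  induction cs generalizing i with
  | nil => simp [signPosL]
  | cons c t ih =>
    by_cases h : isSign c = true <;>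
      simp [signPosL, List.findIdx?_cons, h, ih, Option.map_map, Function.comp_def,
        Nat.add_comm, Nat.add_assoc, Nat.add_left_comm]

theorem signPosL_of_findIdx (cs : List Char) (i j : Nat)
    (h : cs.findIdx? isSign = some j) :
    signPosL cs i = (i + j) :: signPosL (cs.drop (j + 1)) (i + j + 1) := by
  induction cs generalizing i j with
  | nil => simp at h
  | cons c t ih =>
    by_cases hc : isSign c = true
    · simp [List.findIdx?_cons, hc] at h
      subst h
      simp [signPosL, hc]
    · simp [List.findIdx?_cons, hc] at h
      obtain ⟨j', hj', rfl⟩ := h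
      have := ih (i + 1) j' hj'
      simp [signPosL, hc, this]
      constructor <;> [omega; congr 1] <;> omega

-- [c] is a prefix of t iff t starts with c
theorem singleton_prefix_iff (c : Char) (t : List Char) :
    [c] <+: t ↔ t.head? = some c := by
  cases t with
  | nil => simp
  | cons a t => simp [List.cons_prefix_cons, eq_comm]

-- Chars.find for a one-character needle is findIdx?
theorem find_single (l : List Char) (c : Char) :
    PySem.Chars.find l [c] =
      (match l.findIdx? (fun x => x == c) with
       | some j => (j : Int)
       | none => -1) := by
  cases h : l.findIdx? (fun x => x == c) with
  | none =>
    have hmem : c ∉ l := by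
      intro hc
      rcases (List.findIdx?_eq_none_iff.mp h) c hc with h'
      simp at h'
    have : ¬ ([c] <:+: l) := by
      intro hinf
      exact hmem (hinf.subset (by simp))
    simpa using PySem.Chars.find_eq_neg_one_iff l [c] |>.mpr this
  | some j =>
    rcases List.findIdx?_eq_some_iff_getElem.mp h with ⟨hj, hcj, hmin⟩
    have hinf : [c] <:+: l := by
      refine ⟨l.take j, l.drop (j + 1), ?_⟩
      simp at hcj
      rw [← hcj]
      simpa using (List.take_append_getElem_append_drop (l := l) hj).symm
    have hfind0 : 0 ≤ PySem.Chars.find l [c] := (PySem.Chars.find_nonneg_iff l [c]).mpr hinf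
    rcases PySem.Chars.find_spec hfind0 with ⟨hpre, hminf⟩
    set f := (PySem.Chars.find l [c]).toNat with hf
    have h1 : l[f]? = some c := by
      have := (singleton_prefix_iff c (l.drop f)).mp hpre
      simpa [List.head?_drop] using this
    have hflt : f < l.length := (List.getElem?_eq_some_iff.mp h1).1
    have hle1 : j ≤ f := by
      by_contra hcon
      push_neg at hcon
      have := hmin f hcon
      simp [List.getElem?_eq_some_iff.mp h1 |>.2] at this
    have hle2 : f ≤ j := by
      by_contra hcon
      push_neg at hcon
      have := hminf j (by omega)
      apply this
      rw [singleton_prefix_iff]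
      simp [List.head?_drop, hj]
      simpa using hcj
    have : f = j := le_antisymm hle2 hle1
    simp only []
    omega

-- combining the two single-character finds gives the find of the disjunction
theorem combine_findIdx (l : List Char) :
    (match l.findIdx? (fun x => x == '+'), l.findIdx? (fun x => x == '-') with
     | none, o => o
     | some a, none => some a
     | some a, some b => some (min a b))
    = l.findIdx? isSign := by
  induction l with
  | nil => simp
  | cons c t ih =>
    by_cases hp : c = '+'
    · subst hp; simp [List.findIdx?_cons, isSign]
      cases t.findIdx? (fun x => x == '-') <;> simp
    · by_cases hm : c = '-'
      · subst hm; simp [List.findIdx?_cons, isSign, hp]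
        cases t.findIdx? (fun x => x == '+') <;> simp
      · have h1 : (c == '+') = false := by simp [hp]
        have h2 : (c == '-') = false := by simp [hm]
        have h3 : isSign c = false := by simp [isSign, hp, hm]
        simp only [List.findIdx?_cons, h1, h2, h3, Bool.false_eq_true, if_false]
        rw [← ih]
        cases t.findIdx? (fun x => x == '+') <;> cases t.findIdx? (fun x => x == '-') <;>
          simp [Nat.succ_min_succ]

-- B's nextSign at a Nat start is the first sign index ≥ start
theorem nextSign_eq (s : String) (k : Nat) (hk : k ≤ s.toList.length) :
    nextSign s (k : Int) =
      (match (s.toList.drop k).findIdx? isSign with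
       | some j => ((k + j : Nat) : Int)
       | none => -1) := by
  unfold nextSign
  have h1 : ("+" : String).toList = ['+'] := rfl
  have h2 : ("-" : String).toList = ['-'] := rfl
  simp only [PySem.Str.findFrom_eq, h1, h2]
  rw [PySem.Chars.findFrom_natCast _ _ k hk, PySem.Chars.findFrom_natCast _ _ k hk]
  rw [find_single, find_single, ← combine_findIdx]
  cases hp : (s.toList.drop k).findIdx? (fun x => x == '+') with
  | none => cases hm : (s.toList.drop k).findIdx? (fun x => x == '-') <;> simp <;> omega
  | some j1 =>
    cases hm : (s.toList.drop k).findIdx? (fun x => x == '-') with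
    | none => simp <;> omega
    | some j2 =>
      have e1 : ¬ ((j1 : Int) = -1) := by omega
      have e2 : ¬ ((j2 : Int) = -1) := by omega
      have e3 : ¬ ((k : Int) + ↑j1 = -1) := by omega
      have e4 : ¬ ((k : Int) + ↑j2 = -1) := by omega
      simp [e1, e2, e3, e4, Nat.cast_min, min_add_add_left]

theorem findIdx?_lt_length {cs : List Char} {j : Nat} (h : cs.findIdx? isSign = some j) :
    j < cs.length :=
  (List.findIdx?_eq_some_iff_getElem.mp h).1

-- ===== VERDICT (by name: the statement is the Claim_ definition above) =====
theorem splitlocation_spec : Claim_equal_splitlocation := by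
  intro location _ hpre
  unfold Spec_splitlocation splitlocation splitlocation_alt
  simp only
  rw [foldA_inv]
  unfold Pre_splitlocation at hpre
  rw [← signPosL_length location.toList 0, signPosL_eq] at hpre
  rcases hsp : signPos location.toList location.toList.length with _ | ⟨a, _ | ⟨b, rest⟩⟩ <;>
    rw [hsp] at hpre <;> simp at hpre
  -- signPosL cs 0 = a :: b :: rest (shifted by 0)
  have hL : signPosL location.toList 0 = a :: b :: rest := by
    rw [signPosL_eq, hsp]; simp
  have hfi : location.toList.findIdx? isSign = some a := by
    have h4 := signPosL_head location.toList 0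
    rw [hL] at h4
    cases hf : location.toList.findIdx? isSign <;> rw [hf] at h4 <;> simp at h4
    simp [h4]
  have halt : a < location.toList.length := findIdx?_lt_length hfi
  have hstr : signPosL location.toList 0 = a :: signPosL (location.toList.drop (a + 1)) (a + 1) := by
    simpa using signPosL_of_findIdx location.toList 0 a hfi
  have htail : signPosL (location.toList.drop (a + 1)) (a + 1) = b :: rest := by
    rw [hL] at hstr
    exact (List.cons.injEq _ _ _ _ ▸ hstr.symm).2
  have hfi2 : (location.toList.drop (a + 1)).findIdx? isSign = some (b - (a + 1)) ∧ a + 1 ≤ b := by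
    have h5 := signPosL_head (location.toList.drop (a + 1)) (a + 1)
    rw [htail] at h5
    cases hf : (location.toList.drop (a + 1)).findIdx? isSign <;> rw [hf] at h5 <;> simp at h5
    refine ⟨?_, by omega⟩
    congr 1
    omega
  -- B's two calls land on a and b
  have hfirst : nextSign location 0 = (a : Int) := by
    have h6 := nextSign_eq location 0 (by omega)
    rw [List.drop_zero, hfi] at h6
    simpa using h6
  have hsecond : nextSign location ((a : Int) + 1) = (b : Int) := by
    have h7 : ((a : Int) + 1) = ((a + 1 : Nat) : Int) := by push_cast; ring
    rw [h7, nextSign_eq location (a + 1) (by omega), hfi2.1]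
    have h8 : a + 1 + (b - (a + 1)) = b := by omega
    simp [h8]
  rw [hfirst, hsecond]
  simp
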